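-- pv_equiv track=rewrite | github.com/henuzzw/BUCT-CISE-Fault-Localization-Project | zhangzhanwen/GccovFL/test/getResultBySECDLoopsForYJZ.py | getFileInfo
-- ===== SOURCE A (Python) =====
-- def getFileInfo(data):
--     lineSum = 0  # 语句总数量
--     minLineNumber = -1  # 代码中最小的行数
--     maxLineNumber = -1  # 代码中最大的行数
--     errLineNumber = 0  # 错误行总数
--     for index, file in enumerate(data):
--         if index == 0:
--             minLineNumber = len(file['codeList'])
--             maxLineNumber = len(file['codeList'])
--         else:
--             if minLineNumber > len(file['codeList']):
--                 minLineNumber = len(file['codeList'])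
--             if maxLineNumber < len(file['codeList']):
--                 maxLineNumber = len(file['codeList'])
--         lineSum += len(file['codeList'])
--         errLineNumber += len(file['errLines'])
--
--     return (lineSum, errLineNumber, minLineNumber, maxLineNumber)
-- ===== SOURCE B (Python) =====
-- def getFileInfo(data):
--     # Build per-file (codeList length, errLines length) pairs in one comprehension,
--     # then reduce with builtins; same 4-tuple as the fused accumulator loop.
--     pairs = [(len(f['codeList']), len(f['errLines'])) for f in data]
--     lengths = [p[0] for p in pairs]
--     lineSum = sum(lengths)
--     errLineNumber = sum(p[1] for p in pairs)
--     minLineNumber = min(lengths) if lengths else -1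
--     maxLineNumber = max(lengths) if lengths else -1
--     return (lineSum, errLineNumber, minLineNumber, maxLineNumber)
-- ===== Notes on version B (the rewrite author's own statement) =====
-- stated objective: simpler
-- what changed: Replaces the fused index-tracking accumulator loop (with an index==0 special case for min/max) by a single comprehension of per-file (codeList,errLines) lengths followed by builtin sum/min/max reductions with an explicit empty-list default.
import Mathlib
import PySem

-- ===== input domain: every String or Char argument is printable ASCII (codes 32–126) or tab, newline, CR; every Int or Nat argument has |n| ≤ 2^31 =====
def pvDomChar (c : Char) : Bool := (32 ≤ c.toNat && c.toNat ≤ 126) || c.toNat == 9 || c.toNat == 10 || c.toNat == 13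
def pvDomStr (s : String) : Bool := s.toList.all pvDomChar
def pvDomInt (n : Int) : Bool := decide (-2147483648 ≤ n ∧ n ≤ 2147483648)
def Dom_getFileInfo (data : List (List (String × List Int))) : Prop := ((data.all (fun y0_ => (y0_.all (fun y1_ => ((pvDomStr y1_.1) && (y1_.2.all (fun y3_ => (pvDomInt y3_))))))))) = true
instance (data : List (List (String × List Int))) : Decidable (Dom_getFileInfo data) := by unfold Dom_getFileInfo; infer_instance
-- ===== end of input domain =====

-- B replaces A's fused index-tracking accumulator loop by one comprehension of per-file
-- length pairs plus builtin sum/min/max reductions (objective: simpler).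
-- Python raises KeyError when a file dict lacks 'codeList' or 'errLines'; Pre_ excludes that
-- (the ports use getD with default [] there, which is only claimed inside Pre_).

-- ===== PORT A =====
-- the body of A's for-loop over enumerate(data)
def getFileInfo_step (s : Int × Int × Int × Int) (p : Int × List (String × List Int)) :
    Int × Int × Int × Int :=
  let n : Int := ((PySem.Dict.mk p.2).getD "codeList" []).length
  let e : Int := ((PySem.Dict.mk p.2).getD "errLines" []).length
  let mn : Int := if p.1 = 0 then n else if s.2.2.1 > n then n else s.2.2.1
  let mx : Int := if p.1 = 0 then n else if s.2.2.2 < n then n else s.2.2.2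
  (s.1 + n, s.2.1 + e, mn, mx)

def getFileInfo (data : List (List (String × List Int))) : Int × Int × Int × Int :=
  (PySem.List.enumerate data 0).foldl getFileInfo_step (0, 0, -1, -1)

-- ===== PORT B =====
def getFileInfo_alt (data : List (List (String × List Int))) : Int × Int × Int × Int :=
  let pairs : List (Int × Int) := data.map (fun f =>
    ((((PySem.Dict.mk f).getD "codeList" []).length : Int),
     (((PySem.Dict.mk f).getD "errLines" []).length : Int)))
  let lengths : List Int := pairs.map (·.1)
  let lineSum : Int := lengths.sum
  let errLineNumber : Int := (pairs.map (·.2)).sum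
  let minLineNumber : Int := match PySem.List.min? lengths (fun x => x) with
    | none => -1
    | some m => m
  let maxLineNumber : Int := match PySem.List.max? lengths (fun x => x) with
    | none => -1
    | some m => m
  (lineSum, errLineNumber, minLineNumber, maxLineNumber)

-- ===== PRECONDITION & SPEC =====
-- Pre_ excludes exactly the inputs where the Python raises KeyError: a file dict missing
-- the 'codeList' or 'errLines' key.
def Pre_getFileInfo (data : List (List (String × List Int))) : Prop :=
  ∀ f ∈ data, (PySem.Dict.mk f).contains "codeList" = true ∧
              (PySem.Dict.mk f).contains "errLines" = true
instance (data : List (List (String × List Int))) : Decidable (Pre_getFileInfo data) := by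
  unfold Pre_getFileInfo; infer_instance
def pvWitness_getFileInfo : (List (List (String × List Int))) :=
  [[("codeList", [1, 2]), ("errLines", [1])]]

def Spec_getFileInfo (data : List (List (String × List Int))) (out : Int × Int × Int × Int) : Prop := out = getFileInfo_alt data
instance (data : List (List (String × List Int))) (out : Int × Int × Int × Int) : Decidable (Spec_getFileInfo data out) := by unfold Spec_getFileInfo; infer_instance

-- ===== CLAIM (what is proved, stated in full; the proofs are below) =====
def Claim_equal_getFileInfo : Prop := ∀ (data : List (List (String × List Int))), Dom_getFileInfo data → Pre_getFileInfo data → Spec_getFileInfo data (getFileInfo data)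

-- ===== LEMMAS AND PROOFS =====

-- per-file lengths, as the proofs name them
def pvNL (f : List (String × List Int)) : Int := ((PySem.Dict.mk f).getD "codeList" []).length
def pvNE (f : List (String × List Int)) : Int := ((PySem.Dict.mk f).getD "errLines" []).length

-- A's loop over indices ≥ 1 never re-enters the index==0 branch: it is running sum/min/max
lemma getFileInfo_loop (rest : List (List (String × List Int))) :
    ∀ (i ls er mn mx : Int), 1 ≤ i →
      (PySem.List.enumerate rest i).foldl getFileInfo_step (ls, er, mn, mx) =
        (ls + (rest.map pvNL).sum, er + (rest.map pvNE).sum,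
         (rest.map pvNL).foldl min mn, (rest.map pvNL).foldl max mx) := by
  induction rest with
  | nil => intro i ls er mn mx _; simp
  | cons f t ih =>
      intro i ls er mn mx hi
      rw [PySem.List.enumerate_cons, List.foldl_cons]
      have hstep : getFileInfo_step (ls, er, mn, mx) (i, f) =
          (ls + pvNL f, er + pvNE f, min mn (pvNL f), max mx (pvNL f)) := by
        simp only [getFileInfo_step, pvNL, pvNE]
        have hi0 : ¬ i = 0 := by omega
        simp only [hi0, if_false]
        refine Prod.ext rfl (Prod.ext rfl (Prod.ext ?_ ?_)) <;> dsimp <;> split_ifs <;> omega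
      rw [hstep, ih (i + 1) _ _ _ _ (by omega)]
      simp [add_assoc]

theorem getFileInfo_eq (data : List (List (String × List Int))) :
    getFileInfo data = getFileInfo_alt data := by
  cases data with
  | nil => rfl
  | cons f t =>
      have hpair : (fun f => ((((PySem.Dict.mk f).getD "codeList" []).length : Int),
          (((PySem.Dict.mk f).getD "errLines" []).length : Int)))
          = fun f => (pvNL f, pvNE f) := rfl
      have hc : ((fun x : Int × Int => x.1) ∘ fun f => (pvNL f, pvNE f)) = pvNL := rfl
      have hc2 : ((fun x : Int × Int => x.2) ∘ fun f => (pvNL f, pvNE f)) = pvNE := rfl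
      have hstep0 : getFileInfo_step (0, 0, -1, -1) (0, f) =
          (pvNL f, pvNE f, pvNL f, pvNL f) := by
        simp [getFileInfo_step, pvNL, pvNE]
      have hmin := PySem.List.min?_id_cons (x := pvNL f) (t := t.map pvNL)
      have hmax := PySem.List.max?_id_cons (x := pvNL f) (t := t.map pvNL)
      simp only [getFileInfo, getFileInfo_alt, PySem.List.enumerate_cons, List.foldl_cons,
        List.map_cons, List.map_map, hpair, hc, hc2]
      rw [hstep0, show (0:Int)+1 = 1 from rfl, getFileInfo_loop t 1 _ _ _ _ (by omega), hmin, hmax]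
      simp

-- ===== VERDICT (by name: the statement is the Claim_ definition above) =====
theorem getFileInfo_spec : Claim_equal_getFileInfo := by
  intro data _ _
  unfold Spec_getFileInfo; exact getFileInfo_eq data
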